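-- pv_equiv track=rewrite | github.com/adjadeguene/Defi-IA-JASY | Preprocessing.py | NearestDate
-- ===== SOURCE A (Python) =====
-- def NearestDate(items, pivot):  #returns the list of dates closest to pivot
--     liste=[pivot]
--     for i in range(1,len(items)):
--         a=pivot+i
--         b=pivot- i
--         if a <= max(items):
--             liste.append(a)
--         if b >= min(items):
--             liste.append(b)
--     return liste
-- ===== SOURCE B (Python) =====
-- def NearestDate(items, pivot):  # closed-form counts + range construction, no per-element bound checks
--     n = len(items)
--     if n <= 1:
--         return [pivot]
--     ku = max(0, min(n - 1, max(items) - pivot))   # how many upward values survive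
--     kd = max(0, min(n - 1, pivot - min(items)))   # how many downward values survive
--     k = min(ku, kd)
--     body = [x for j in range(1, k + 1) for x in (pivot + j, pivot - j)]
--     tail = [pivot + j for j in range(k + 1, ku + 1)] + [pivot - j for j in range(k + 1, kd + 1)]
--     return [pivot] + body + tail
-- ===== Notes on version B (the rewrite author's own statement) =====
-- stated objective: faster
-- what changed: A scans outward testing each candidate against max(items)/min(items) recomputed every iteration; B computes the two surviving counts ku and kd in closed form once and then emits the result directly from integer ranges (interleaved pairs for the common prefix, a single run for the longer side), with no per-element bound checks at all.
import Mathlib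
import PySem

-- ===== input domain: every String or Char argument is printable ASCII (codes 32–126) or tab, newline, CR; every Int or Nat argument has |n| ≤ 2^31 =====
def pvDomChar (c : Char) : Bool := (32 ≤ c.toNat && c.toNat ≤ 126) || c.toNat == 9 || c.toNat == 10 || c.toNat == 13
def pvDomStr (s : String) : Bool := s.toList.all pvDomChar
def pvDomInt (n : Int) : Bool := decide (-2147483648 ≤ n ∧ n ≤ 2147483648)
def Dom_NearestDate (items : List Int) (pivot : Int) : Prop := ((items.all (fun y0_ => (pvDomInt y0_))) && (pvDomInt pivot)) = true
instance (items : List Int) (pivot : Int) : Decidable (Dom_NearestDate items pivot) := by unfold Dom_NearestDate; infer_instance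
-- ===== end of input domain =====

-- B replaces A's outward scan (which re-tests every candidate against max(items)/min(items),
-- recomputed each iteration) by a closed-form computation of the two surviving counts and a
-- direct range-based construction of the output: faster by an asymptotic change (O(n^2) -> O(n)).

-- ===== PORT A =====
def NearestDate (items : List Int) (pivot : Int) : List Int :=
  (PySem.List.pyRange 1 (PySem.List.len items) 1).foldl (fun liste i =>
    let a := pivot + i
    let b := pivot - i
    let liste :=
      match PySem.List.max? items (fun x => x) with
      | some mx => if a ≤ mx then liste ++ [a] else liste
      | none => liste                                   -- unreachable: loop body runs only when len(items) ≥ 2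
    match PySem.List.min? items (fun x => x) with
    | some mn => if mn ≤ b then liste ++ [b] else liste
    | none => liste) [pivot]

-- ===== PORT B =====
def NearestDate_alt (items : List Int) (pivot : Int) : List Int :=
  let n := PySem.List.len items
  if n ≤ 1 then [pivot]
  else
    match PySem.List.max? items (fun x => x), PySem.List.min? items (fun x => x) with
    | some mx, some mn =>
      let ku := max 0 (min (n - 1) (mx - pivot))
      let kd := max 0 (min (n - 1) (pivot - mn))
      let k := min ku kd
      let body := (PySem.List.pyRange 1 (k + 1) 1).flatMap (fun j => [pivot + j, pivot - j])
      let tail := (PySem.List.pyRange (k + 1) (ku + 1) 1).map (fun j => pivot + j)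
        ++ (PySem.List.pyRange (k + 1) (kd + 1) 1).map (fun j => pivot - j)
      [pivot] ++ body ++ tail
    | _, _ => [pivot]                                   -- unreachable: n ≥ 2 means items ≠ []

-- ===== PRECONDITION & SPEC =====
def Spec_NearestDate (items : List Int) (pivot : Int) (out : List Int) : Prop := out = NearestDate_alt items pivot
instance (items : List Int) (pivot : Int) (out : List Int) : Decidable (Spec_NearestDate items pivot out) := by unfold Spec_NearestDate; infer_instance

-- ===== CLAIM =====
def Claim_equal_NearestDate : Prop := ∀ (items : List Int) (pivot : Int), Dom_NearestDate items pivot → Spec_NearestDate items pivot (NearestDate items pivot)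

-- ===== LEMMAS AND PROOFS =====

-- proof-only helper: interleaving of two lists, with A's up-before-down order
def pvInterleave : List Int → List Int → List Int
  | [], ds => ds
  | u :: us, [] => u :: pvInterleave us []
  | u :: us, d :: ds => u :: d :: pvInterleave us ds

theorem pvInterleave_nil_right (us : List Int) : pvInterleave us [] = us := by
  induction us with
  | nil => rfl
  | cons x xs ih => simp [pvInterleave, ih]

theorem pvInterleave_app_app (us ds : List Int) (u d : Int) (h : us.length = ds.length) :
    pvInterleave (us ++ [u]) (ds ++ [d]) = pvInterleave us ds ++ [u, d] := by
  induction us generalizing ds with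
  | nil => cases ds with
    | nil => simp [pvInterleave]
    | cons _ _ => simp at h
  | cons x xs ih => cases ds with
    | nil => simp at h
    | cons y ys => simp [pvInterleave, ih ys (by simpa using h)]

theorem pvInterleave_app_left (us ds : List Int) (u : Int) (h : ds.length ≤ us.length) :
    pvInterleave (us ++ [u]) ds = pvInterleave us ds ++ [u] := by
  induction us generalizing ds with
  | nil =>
    cases ds with
    | nil => simp [pvInterleave]
    | cons _ _ => simp at h
  | cons x xs ih => cases ds with
    | nil => simp [pvInterleave, ih [] (by simp)]
    | cons y ys => simp [pvInterleave, ih ys (by simpa using h)]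

theorem pvInterleave_app_right (us ds : List Int) (d : Int) (h : us.length ≤ ds.length) :
    pvInterleave us (ds ++ [d]) = pvInterleave us ds ++ [d] := by
  induction us generalizing ds with
  | nil => simp [pvInterleave]
  | cons x xs ih => cases ds with
    | nil => simp at h
    | cons y ys => simp [pvInterleave, ih ys (by simpa using h)]

-- A's loop over range(1, 1+m) equals pivot :: interleave of the two filtered candidate lists.
theorem pvLoop (pivot mx mn : Int) (m : Nat) :
    (PySem.List.pyRange 1 (1 + (m : Int)) 1).foldl
      (fun liste i =>
        let a := pivot + i
        let b := pivot - i
        let liste := if a ≤ mx then liste ++ [a] else liste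
        if mn ≤ b then liste ++ [b] else liste) [pivot]
    = pivot :: pvInterleave
        (((PySem.List.pyRange 1 (1 + (m : Int)) 1).filter (fun i => decide (pivot + i ≤ mx))).map
          (fun i => pivot + i))
        (((PySem.List.pyRange 1 (1 + (m : Int)) 1).filter (fun i => decide (mn ≤ pivot - i))).map
          (fun i => pivot - i)) := by
  induction m with
  | zero => simp [PySem.List.pyRange_one_eq_nil (by omega : (1:Int) ≤ 1), pvInterleave]
  | succ m ih =>
    have hsplit : (1 + ((m + 1 : Nat) : Int)) = (1 + (m : Int)) + 1 := by push_cast; ring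
    rw [hsplit, PySem.List.pyRange_one_succ_right (by omega : (1:Int) ≤ 1 + m),
      List.foldl_append, ih, List.filter_append, List.filter_append]
    have hUfull : pivot + (1 + (m : Int)) ≤ mx →
        (PySem.List.pyRange 1 (1 + (m : Int)) 1).filter (fun i => decide (pivot + i ≤ mx))
          = PySem.List.pyRange 1 (1 + (m : Int)) 1 := by
      intro ht
      apply List.filter_eq_self.mpr
      intro i hi
      have hmem := PySem.List.mem_pyRange_one.mp hi
      simp only [decide_eq_true_eq]
      omega
    have hDfull : mn ≤ pivot - (1 + (m : Int)) →
        (PySem.List.pyRange 1 (1 + (m : Int)) 1).filter (fun i => decide (mn ≤ pivot - i))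
          = PySem.List.pyRange 1 (1 + (m : Int)) 1 := by
      intro ht
      apply List.filter_eq_self.mpr
      intro i hi
      have hmem := PySem.List.mem_pyRange_one.mp hi
      simp only [decide_eq_true_eq]
      omega
    by_cases hu : pivot + (1 + (m : Int)) ≤ mx <;> by_cases hd : mn ≤ pivot - (1 + (m : Int))
    · have e1 : List.filter (fun i => decide (pivot + i ≤ mx)) [1 + (m : Int)] = [1 + (m : Int)] := by
        simp [hu]
      have e2 : List.filter (fun i => decide (mn ≤ pivot - i)) [1 + (m : Int)] = [1 + (m : Int)] := by
        simp [hd]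
      rw [e1, e2]
      have hlen : (((PySem.List.pyRange 1 (1 + (m : Int)) 1).filter
            (fun i => decide (pivot + i ≤ mx))).map (fun i => pivot + i)).length
          = (((PySem.List.pyRange 1 (1 + (m : Int)) 1).filter
            (fun i => decide (mn ≤ pivot - i))).map (fun i => pivot - i)).length := by
        rw [hUfull hu, hDfull hd]
        simp
      simp only [List.foldl_cons, List.foldl_nil, if_pos hu, if_pos hd,
        List.map_append, List.map_cons, List.map_nil]
      rw [pvInterleave_app_app _ _ _ _ hlen]
      simp
    · have e1 : List.filter (fun i => decide (pivot + i ≤ mx)) [1 + (m : Int)] = [1 + (m : Int)] := by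
        simp [hu]
      have e2 : List.filter (fun i => decide (mn ≤ pivot - i)) [1 + (m : Int)] = [] := by
        simp [hd]
      rw [e1, e2]
      have hlen : (((PySem.List.pyRange 1 (1 + (m : Int)) 1).filter
            (fun i => decide (mn ≤ pivot - i))).map (fun i => pivot - i)).length
          ≤ (((PySem.List.pyRange 1 (1 + (m : Int)) 1).filter
            (fun i => decide (pivot + i ≤ mx))).map (fun i => pivot + i)).length := by
        rw [hUfull hu]
        simp only [List.length_map]
        exact List.length_filter_le _ _
      simp only [List.foldl_cons, List.foldl_nil, if_pos hu, if_neg hd,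
        List.map_append, List.map_cons, List.map_nil, List.append_nil]
      rw [pvInterleave_app_left _ _ _ hlen]
      simp
    · have e1 : List.filter (fun i => decide (pivot + i ≤ mx)) [1 + (m : Int)] = [] := by
        simp [hu]
      have e2 : List.filter (fun i => decide (mn ≤ pivot - i)) [1 + (m : Int)] = [1 + (m : Int)] := by
        simp [hd]
      rw [e1, e2]
      have hlen : (((PySem.List.pyRange 1 (1 + (m : Int)) 1).filter
            (fun i => decide (pivot + i ≤ mx))).map (fun i => pivot + i)).length
          ≤ (((PySem.List.pyRange 1 (1 + (m : Int)) 1).filter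
            (fun i => decide (mn ≤ pivot - i))).map (fun i => pivot - i)).length := by
        rw [hDfull hd]
        simp only [List.length_map]
        exact List.length_filter_le _ _
      simp only [List.foldl_cons, List.foldl_nil, if_neg hu, if_pos hd,
        List.map_append, List.map_cons, List.map_nil, List.append_nil]
      rw [pvInterleave_app_right _ _ _ hlen]
      simp
    · have e1 : List.filter (fun i => decide (pivot + i ≤ mx)) [1 + (m : Int)] = [] := by
        simp [hu]
      have e2 : List.filter (fun i => decide (mn ≤ pivot - i)) [1 + (m : Int)] = [] := by
        simp [hd]
      rw [e1, e2]
      simp [if_neg hu, if_neg hd]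

-- filtering an increasing unit range by 'i ≤ c' keeps exactly the initial clamped segment
theorem pvFilter_le_range (c : Int) (m : Nat) (p : Int → Bool) (hp : ∀ i, p i = decide (i ≤ c)) :
    (PySem.List.pyRange 1 (1 + (m : Int)) 1).filter p
      = PySem.List.pyRange 1 (max 0 (min (m : Int) c) + 1) 1 := by
  induction m with
  | zero =>
    rw [PySem.List.pyRange_one_eq_nil (by omega : (1:Int) + (0:Nat) ≤ 1)]
    rw [PySem.List.pyRange_one_eq_nil (by omega : max 0 (min ((0:Nat):Int) c) + 1 ≤ 1)]
    rfl
  | succ m ih =>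
    have hsplit : (1 + ((m + 1 : Nat) : Int)) = (1 + (m : Int)) + 1 := by push_cast; ring
    rw [hsplit, PySem.List.pyRange_one_succ_right (by omega : (1:Int) ≤ 1 + m),
      List.filter_append, ih]
    by_cases hc : 1 + (m : Int) ≤ c
    · have e1 : List.filter p [1 + (m : Int)] = [1 + (m : Int)] := by
        simp [hp, hc]
      rw [e1]
      have h1 : max 0 (min ((m:Int)) c) + 1 = 1 + (m : Int) := by omega
      have h2 : max 0 (min (((m+1 : Nat)):Int) c) + 1 = (1 + (m : Int)) + 1 := by push_cast; omega
      rw [h1, h2, PySem.List.pyRange_one_succ_right (by omega : (1:Int) ≤ 1 + m)]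
    · have e1 : List.filter p [1 + (m : Int)] = [] := by
        simp [hp, hc]
      rw [e1, List.append_nil]
      have h2 : max 0 (min (((m+1 : Nat)):Int) c) = max 0 (min ((m:Int)) c) := by push_cast; omega
      rw [h2]

-- interleaving two mapped unit ranges with a common start = flatMap over the common prefix
-- followed by the mapped leftover of the longer side
theorem pvInterleave_ranges (f g : Int → Int) (s : Int) (u d : Nat) :
    pvInterleave ((PySem.List.pyRange s (s + (u : Int)) 1).map f)
      ((PySem.List.pyRange s (s + (d : Int)) 1).map g)
    = (PySem.List.pyRange s (s + ((min u d : Nat) : Int)) 1).flatMap (fun j => [f j, g j])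
      ++ (PySem.List.pyRange (s + ((min u d : Nat) : Int)) (s + (u : Int)) 1).map f
      ++ (PySem.List.pyRange (s + ((min u d : Nat) : Int)) (s + (d : Int)) 1).map g := by
  induction u generalizing s d with
  | zero =>
    rw [PySem.List.pyRange_one_eq_nil (by omega : s + ((0:Nat):Int) ≤ s)]
    have hmin : min 0 d = 0 := by omega
    rw [hmin]
    rw [PySem.List.pyRange_one_eq_nil (by omega : s + ((0:Nat):Int) ≤ s)]
    have hst : s + ((0:Nat):Int) = s := by omega
    rw [hst]
    simp [pvInterleave]
  | succ u ih =>
    cases d with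
    | zero =>
      rw [PySem.List.pyRange_one_eq_nil (by omega : s + ((0:Nat):Int) ≤ s)]
      have hmin : min (u + 1) 0 = 0 := by omega
      rw [hmin]
      rw [PySem.List.pyRange_one_eq_nil (by omega : s + ((0:Nat):Int) ≤ s)]
      have hst : s + ((0:Nat):Int) = s := by omega
      rw [hst]
      simp [pvInterleave_nil_right]
    | succ d =>
      have hcu : PySem.List.pyRange s (s + ((u + 1 : Nat) : Int)) 1
          = s :: PySem.List.pyRange (s + 1) (s + ((u + 1 : Nat) : Int)) 1 :=
        PySem.List.pyRange_one_cons (by push_cast; omega)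
      have hcd : PySem.List.pyRange s (s + ((d + 1 : Nat) : Int)) 1
          = s :: PySem.List.pyRange (s + 1) (s + ((d + 1 : Nat) : Int)) 1 :=
        PySem.List.pyRange_one_cons (by push_cast; omega)
      have hu' : s + ((u + 1 : Nat) : Int) = (s + 1) + (u : Int) := by push_cast; omega
      have hd' : s + ((d + 1 : Nat) : Int) = (s + 1) + (d : Int) := by push_cast; omega
      have hmin : (min (u + 1) (d + 1) : Nat) = (min u d : Nat) + 1 := by omega
      have hcm : PySem.List.pyRange s (s + ((min (u+1) (d+1) : Nat) : Int)) 1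
          = s :: PySem.List.pyRange (s + 1) (s + ((min (u+1) (d+1) : Nat) : Int)) 1 :=
        PySem.List.pyRange_one_cons (by rw [hmin]; push_cast; omega)
      have hm' : s + ((min (u+1) (d+1) : Nat) : Int) = (s + 1) + ((min u d : Nat) : Int) := by
        rw [hmin]; push_cast; omega
      rw [hcu, hcd, hcm, hu', hd', hm', List.map_cons, List.map_cons]
      simp only [pvInterleave, List.flatMap_cons]
      rw [ih (s + 1) d]
      simp

-- ===== VERDICT =====
theorem NearestDate_spec : Claim_equal_NearestDate := by
  intro items pivot _
  unfold Spec_NearestDate NearestDate NearestDate_alt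
  by_cases h : PySem.List.len items ≤ 1
  · have h' : ((items.length : Int)) ≤ 1 := by rwa [PySem.List.len_eq] at h
    have hn : items.length ≤ 1 := by omega
    simp [PySem.List.len_eq, PySem.List.pyRange_one_eq_nil h', hn]
  · have hne : items ≠ [] := by
      intro he
      rw [he] at h
      simp [PySem.List.len_eq] at h
    obtain ⟨mx, hmx⟩ : ∃ mx, PySem.List.max? items (fun x => x) = some mx := by
      cases hc : PySem.List.max? items (fun x => x) with
      | none => exact absurd ((PySem.List.max?_eq_none_iff _ _).mp hc) hne
      | some v => exact ⟨v, rfl⟩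
    obtain ⟨mn, hmn⟩ : ∃ mn, PySem.List.min? items (fun x => x) = some mn := by
      cases hc : PySem.List.min? items (fun x => x) with
      | none => exact absurd ((PySem.List.min?_eq_none_iff _ _).mp hc) hne
      | some v => exact ⟨v, rfl⟩
    obtain ⟨k, hk⟩ : ∃ k : Nat, items.length = k + 1 := by
      cases items with
      | nil => exact absurd rfl hne
      | cons x xs => exact ⟨xs.length, rfl⟩
    have hlen2 : PySem.List.len items = 1 + (k : Int) := by
      rw [PySem.List.len_eq, hk]
      push_cast
      ring
    simp only [hmx, hmn, hlen2]
    rw [if_neg (by omega : ¬ ((1 : Int) + (k : Int) ≤ 1))]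
    rw [pvLoop pivot mx mn k]
    -- identify the filtered candidate lists with clamped unit ranges
    set ku : Int := max 0 (min ((1 + (k:Int)) - 1) (mx - pivot)) with hku
    set kd : Int := max 0 (min ((1 + (k:Int)) - 1) (pivot - mn)) with hkd
    have hU : (PySem.List.pyRange 1 (1 + (k : Int)) 1).filter (fun i => decide (pivot + i ≤ mx))
        = PySem.List.pyRange 1 (ku + 1) 1 := by
      rw [pvFilter_le_range (mx - pivot) k _ (fun i => by simp only [decide_eq_decide]; omega)]
      have : max 0 (min ((k:Int)) (mx - pivot)) = ku := by rw [hku]; omega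
      rw [this]
    have hD : (PySem.List.pyRange 1 (1 + (k : Int)) 1).filter (fun i => decide (mn ≤ pivot - i))
        = PySem.List.pyRange 1 (kd + 1) 1 := by
      rw [pvFilter_le_range (pivot - mn) k _ (fun i => by simp only [decide_eq_decide]; omega)]
      have : max 0 (min ((k:Int)) (pivot - mn)) = kd := by rw [hkd]; omega
      rw [this]
    rw [hU, hD]
    -- express the clamped bounds as naturals to apply the interleave/range lemma
    obtain ⟨u, hu⟩ : ∃ u : Nat, ku = (u : Int) := ⟨ku.toNat, by rw [hku]; omega⟩
    obtain ⟨d, hd⟩ : ∃ d : Nat, kd = (d : Int) := ⟨kd.toNat, by rw [hkd]; omega⟩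
    rw [hu, hd]
    rw [show (min (u:Int) (d:Int)) = ((min u d : Nat) : Int) from by push_cast; omega]
    have h1 : ((u:Int) + 1) = 1 + (u:Int) := by ring
    have h2 : ((d:Int) + 1) = 1 + (d:Int) := by ring
    have h3 : ((min u d : Nat):Int) + 1 = 1 + ((min u d : Nat):Int) := by ring
    rw [h1, h2, h3]
    rw [pvInterleave_ranges (fun i => pivot + i) (fun i => pivot - i) 1 u d]
    simp
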